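-- pv_equiv track=rewrite | github.com/Cyberninja101/Groovy | CV/main.py | build_chord_starts
-- ===== SOURCE A (Python) =====
-- from typing import Deque, Dict, List, Optional, Set, Tuple
--
-- def build_chord_starts(events: List[dict], chord_eps_ms: int) -> List[int]:
--     starts: List[int] = []
--     i = 0
--     while i < len(events):
--         starts.append(i)
--         _t, group = group_chord(events, i, chord_eps_ms)
--         i += len(group)
--     return starts
--
-- def group_chord(events: List[dict], idx: int, chord_eps_ms: int) -> Tuple[int, List[dict]]:
--     t0 = events[idx]["t_ms"]
--     group = [events[idx]]
--     j = idx + 1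
--     while j < len(events) and abs(events[j]["t_ms"] - t0) <= chord_eps_ms:
--         group.append(events[j])
--         j += 1
--     return t0, group
-- ===== SOURCE B (Python) =====
-- def build_chord_starts(events, chord_eps_ms):
--     if not events:
--         return []
--     starts = [0]
--     t0 = events[0]["t_ms"]
--     for i in range(1, len(events)):
--         t = events[i]["t_ms"]
--         if abs(t - t0) > chord_eps_ms:
--             starts.append(i)
--             t0 = t
--     return starts
-- ===== Notes on version B (the rewrite author's own statement) =====
-- stated objective: simpler
-- what changed: Replaced the outer while-loop that calls a group-building helper (materialising each chord group list and advancing by its length) with a single linear scan keeping only the current group's first timestamp as scalar state; no group lists are built.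
import Mathlib
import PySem

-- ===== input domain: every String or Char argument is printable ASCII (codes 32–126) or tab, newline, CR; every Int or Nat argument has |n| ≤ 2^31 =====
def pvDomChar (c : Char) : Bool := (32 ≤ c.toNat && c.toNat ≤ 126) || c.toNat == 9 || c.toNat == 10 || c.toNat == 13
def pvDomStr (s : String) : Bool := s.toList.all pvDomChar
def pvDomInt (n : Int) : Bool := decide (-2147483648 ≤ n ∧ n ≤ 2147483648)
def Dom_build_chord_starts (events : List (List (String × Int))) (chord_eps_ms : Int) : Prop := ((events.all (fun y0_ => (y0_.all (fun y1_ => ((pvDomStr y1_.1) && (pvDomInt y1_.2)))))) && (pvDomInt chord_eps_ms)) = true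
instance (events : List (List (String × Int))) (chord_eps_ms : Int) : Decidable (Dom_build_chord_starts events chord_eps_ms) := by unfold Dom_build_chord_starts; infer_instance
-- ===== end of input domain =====

-- B replaces A's helper-driven group construction by a single linear scan that keeps only the
-- current group's first timestamp as scalar state (simpler; same return value on Pre_).


-- ===== PORT A =====
-- events[i]["t_ms"]: dict lookup (first match in the association list). Pre_ guarantees the key
-- is present, so the `.getD 0` default is never used on admitted inputs (Python raises KeyError there).
def pvTms (e : List (String × Int)) : Int := (List.lookup "t_ms" e).getD 0

-- inner while-loop of group_chord: appends events[j] to the group while within eps of t0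
def pvGroupLoop (events : List (List (String × Int))) (chord_eps_ms t0 : Int)
    (group : List (List (String × Int))) (j : Nat) : List (List (String × Int)) :=
  if h : j < events.length ∧ |pvTms events[j]! - t0| ≤ chord_eps_ms then
    pvGroupLoop events chord_eps_ms t0 (group ++ [events[j]!]) (j + 1)
  else group
termination_by events.length - j
decreasing_by omega

def group_chord (events : List (List (String × Int))) (idx : Nat) (chord_eps_ms : Int) :
    Int × List (List (String × Int)) :=
  let t0 := pvTms events[idx]!
  (t0, pvGroupLoop events chord_eps_ms t0 [events[idx]!] (idx + 1))

lemma pvGroupLoop_len (events : List (List (String × Int))) (eps t0 : Int)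
    (g : List (List (String × Int))) (j : Nat) :
    g.length ≤ (pvGroupLoop events eps t0 g j).length := by
  unfold pvGroupLoop
  split
  · exact le_trans (by simp) (pvGroupLoop_len events eps t0 (g ++ [events[j]!]) (j + 1))
  · exact le_refl _
termination_by events.length - j
decreasing_by omega

-- outer while-loop of A
def pvALoop (events : List (List (String × Int))) (chord_eps_ms : Int)
    (starts : List Int) (i : Nat) : List Int :=
  if h : i < events.length then
    pvALoop events chord_eps_ms (starts ++ [(i : Int)])
      (i + (group_chord events i chord_eps_ms).2.length)
  else starts
termination_by events.length - i
decreasing_by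
  have h1 : 1 ≤ (group_chord events i chord_eps_ms).2.length := by
    have := pvGroupLoop_len events chord_eps_ms (pvTms events[i]!) [events[i]!] (i + 1)
    simpa [group_chord] using this
  omega

def build_chord_starts (events : List (List (String × Int))) (chord_eps_ms : Int) : List Int :=
  pvALoop events chord_eps_ms [] 0

-- ===== PORT B =====
-- single scan over the remaining events; t0 is the current group's first timestamp
def pvBLoop (chord_eps_ms : Int) : List (List (String × Int)) → Int → Nat → List Int
  | [], _, _ => []
  | e :: rest, t0, i =>
    let t := pvTms e
    if |t - t0| > chord_eps_ms then (i : Int) :: pvBLoop chord_eps_ms rest t (i + 1)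
    else pvBLoop chord_eps_ms rest t0 (i + 1)

def build_chord_starts_alt (events : List (List (String × Int))) (chord_eps_ms : Int) : List Int :=
  match events with
  | [] => []
  | e :: rest => 0 :: pvBLoop chord_eps_ms rest (pvTms e) 1

-- ===== PRECONDITION & SPEC =====
-- Pre_ excludes exactly the inputs on which Python A raises KeyError: an event dict without "t_ms".
def Pre_build_chord_starts (events : List (List (String × Int))) (chord_eps_ms : Int) : Prop :=
  ∀ e ∈ events, (List.lookup "t_ms" e).isSome
instance (events : List (List (String × Int))) (chord_eps_ms : Int) : Decidable (Pre_build_chord_starts events chord_eps_ms) := by unfold Pre_build_chord_starts; infer_instance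

def pvWitness_build_chord_starts : (List (List (String × Int))) × Int :=
  ([[("t_ms", 0)], [("t_ms", 3)], [("t_ms", 10)]], 4)

def Spec_build_chord_starts (events : List (List (String × Int))) (chord_eps_ms : Int) (out : List Int) : Prop := out = build_chord_starts_alt events chord_eps_ms
instance (events : List (List (String × Int))) (chord_eps_ms : Int) (out : List Int) : Decidable (Spec_build_chord_starts events chord_eps_ms out) := by unfold Spec_build_chord_starts; infer_instance

-- ===== CLAIM (what is proved, stated in full; the proofs are below) =====
def Claim_equal_build_chord_starts : Prop := ∀ (events : List (List (String × Int))) (chord_eps_ms : Int), Dom_build_chord_starts events chord_eps_ms → Pre_build_chord_starts events chord_eps_ms → Spec_build_chord_starts events chord_eps_ms (build_chord_starts events chord_eps_ms)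

-- ===== LEMMAS AND PROOFS =====

-- length of the group built by the inner loop, as a count of consecutive in-eps indices
def pvGLen (events : List (List (String × Int))) (eps t0 : Int) (j : Nat) : Nat :=
  if h : j < events.length ∧ |pvTms events[j]! - t0| ≤ eps then
    1 + pvGLen events eps t0 (j + 1)
  else 0
termination_by events.length - j
decreasing_by omega

lemma pvGroupLoop_length (events : List (List (String × Int))) (eps t0 : Int)
    (g : List (List (String × Int))) (j : Nat) :
    (pvGroupLoop events eps t0 g j).length = g.length + pvGLen events eps t0 j := by
  unfold pvGroupLoop pvGLen
  split
  · rw [pvGroupLoop_length events eps t0 (g ++ [events[j]!]) (j + 1)]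
    simp; omega
  · simp
termination_by events.length - j
decreasing_by omega

lemma pvGLen_bound (events : List (List (String × Int))) (eps t0 : Int) (j : Nat) :
    j + pvGLen events eps t0 j ≤ events.length ∨ pvGLen events eps t0 j = 0 := by
  unfold pvGLen
  split
  · rcases pvGLen_bound events eps t0 (j + 1) with h | h
    · left; omega
    · left; rename_i hc; omega
  · right; rfl
termination_by events.length - j
decreasing_by omega

-- "start a fresh group at index k" on the B side
def pvBStart (events : List (List (String × Int))) (eps : Int) (k : Nat) : List Int :=
  match h : events.drop k with
  | [] => []
  | e :: _ => (k : Int) :: pvBLoop eps (events.drop (k + 1)) (pvTms e) (k + 1)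

lemma drop_cons_of_lt (events : List (List (String × Int))) (j : Nat) (h : j < events.length) :
    events.drop j = events[j]! :: events.drop (j + 1) := by
  rw [List.getElem!_eq_getElem?_getD, List.getElem?_eq_getElem h]
  simpa using List.drop_eq_getElem_cons h

lemma pvBStart_nil (events : List (List (String × Int))) (eps : Int) (k : Nat)
    (h : ¬ k < events.length) : pvBStart events eps k = [] := by
  unfold pvBStart
  have : events.drop k = [] := List.drop_eq_nil_of_le (by omega)
  split
  · rfl
  · rename_i e rest heq; rw [this] at heq; cases heq

lemma pvBStart_cons (events : List (List (String × Int))) (eps : Int) (k : Nat)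
    (h : k < events.length) :
    pvBStart events eps k
      = (k : Int) :: pvBLoop eps (events.drop (k + 1)) (pvTms events[k]!) (k + 1) := by
  unfold pvBStart
  split
  · rename_i heq
    rw [drop_cons_of_lt events k h] at heq; cases heq
  · rename_i e rest heq
    rw [drop_cons_of_lt events k h] at heq
    cases heq; rfl

-- B's inner scan skips the in-eps tail of the current group and then starts a fresh group
lemma pvBLoop_skip (events : List (List (String × Int))) (eps t0 : Int) (j : Nat)
    (hj : j ≤ events.length) :
    pvBLoop eps (events.drop j) t0 j = pvBStart events eps (j + pvGLen events eps t0 j) := by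
  by_cases hlt : j < events.length
  · rw [drop_cons_of_lt events j hlt]
    unfold pvBLoop
    by_cases hin : |pvTms events[j]! - t0| ≤ eps
    · have hng : ¬ |pvTms events[j]! - t0| > eps := by omega
      rw [if_neg hng]
      rw [pvBLoop_skip events eps t0 (j + 1) (by omega)]
      have hg : pvGLen events eps t0 j = 1 + pvGLen events eps t0 (j + 1) := by
        rw [pvGLen]; rw [dif_pos ⟨hlt, hin⟩]
      rw [hg]
      congr 1
      omega
    · have hgt : |pvTms events[j]! - t0| > eps := by omega
      simp only [if_pos hgt]
      have h0 : pvGLen events eps t0 j = 0 := by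
        rw [pvGLen]; rw [dif_neg (by push_neg; intro _; omega)]
      rw [h0]
      have hj0 : j + 0 = j := rfl
      rw [hj0, pvBStart_cons events eps j hlt]
  · have hj' : j = events.length := by omega
    have h0 : pvGLen events eps t0 j = 0 := by
      rw [pvGLen]; rw [dif_neg (by push_neg; intro h; omega)]
    rw [h0]
    have : events.drop j = [] := List.drop_eq_nil_of_le (by omega)
    rw [this, pvBStart_nil events eps _ (by omega)]
    rfl
termination_by events.length - j
decreasing_by omega

-- A's outer loop accumulates exactly the fresh-group starts
lemma pvALoop_eq (events : List (List (String × Int))) (eps : Int) (acc : List Int) (i : Nat) :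
    pvALoop events eps acc i = acc ++ pvBStart events eps i := by
  by_cases h : i < events.length
  · rw [pvALoop, dif_pos h]
    have hglen : (group_chord events i eps).2.length
        = 1 + pvGLen events eps (pvTms events[i]!) (i + 1) := by
      simp [group_chord, pvGroupLoop_length]
    rw [pvALoop_eq events eps (acc ++ [(i : Int)]) (i + (group_chord events i eps).2.length)]
    rw [pvBStart_cons events eps i h]
    have hskip := pvBLoop_skip events eps (pvTms events[i]!) (i + 1) (by omega)
    rw [hskip, hglen]
    have harg : i + 1 + pvGLen events eps (pvTms events[i]!) (i + 1)
        = i + (1 + pvGLen events eps (pvTms events[i]!) (i + 1)) := by omega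
    rw [harg]
    simp
  · rw [pvALoop, dif_neg h, pvBStart_nil events eps i h]
    simp
termination_by events.length - i
decreasing_by
  have h1 : 1 ≤ (group_chord events i eps).2.length := by
    have := pvGroupLoop_len events eps (pvTms events[i]!) [events[i]!] (i + 1)
    simpa [group_chord] using this
  omega

lemma alt_eq_bstart (events : List (List (String × Int))) (eps : Int) :
    build_chord_starts_alt events eps = pvBStart events eps 0 := by
  cases events with
  | nil => rfl
  | cons e rest =>
    rw [build_chord_starts_alt, pvBStart_cons _ eps 0 (by simp)]
    simp

-- ===== VERDICT (by name: the statement is the Claim_ definition above) =====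
theorem build_chord_starts_spec : Claim_equal_build_chord_starts := by
  intro events eps _ _
  unfold Spec_build_chord_starts build_chord_starts
  rw [pvALoop_eq, alt_eq_bstart]
  simp
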